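-- pv_equiv track=rewrite | github.com/Yashbansal411/office_project_backup | File_compare/fileCompare26nov.py | func
-- ===== SOURCE A (Python) =====
-- def func(list1,list2):
--     list3 = ['\n']*(len(list1))
--     lastInsertedIndex = -1
--     indexList2 = 0
--     for i in list2:
--         if i in list1:
--             try:
--                 index = list1.index(i,lastInsertedIndex+1,len(list1)-1)
--                 list3[index] = i
--                 lastInsertedIndex = index
--             except ValueError:
--                 continue
--
--         else:
--              if indexList2 == len(list2)-1:
--                  if list3[len(list3)-1] == '\n':
--                     list3[len(list3)-1] = i.rstrip('\n') + '<mismatch>\n'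
--                  else :
--                      list3.append(i.rstrip('\n') + '<mismatch>\n')
--              else:
--                  try:
--                     list3[lastInsertedIndex+1] = i.rstrip('\n') + '<mismatch>\n'
--                  except IndexError:
--                     list3.append(i.rstrip('\n') + '<mismatch>\n')
--                  lastInsertedIndex += 1
--         indexList2 += 1
--     return list3
-- ===== SOURCE B (Python) =====
-- def _bisect_left(a, x):
--     lo, hi = 0, len(a)
--     while lo < hi:
--         mid = (lo + hi) // 2
--         if a[mid] < x:
--             lo = mid + 1
--         else:
--             hi = mid
--     return lo
--
-- def func(list1, list2):
--     occ = {}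
--     for idx, v in enumerate(list1[:-1]):
--         occ.setdefault(v, []).append(idx)
--     members = set(list1)
--     out = ['\n'] * len(list1)
--     last = -1
--     pos = 0
--     n2 = len(list2)
--     for i in list2:
--         if i in members:
--             idxs = occ.get(i, [])
--             k = _bisect_left(idxs, last + 1)
--             if k == len(idxs):
--                 continue  # no occurrence left in the searchable window
--             last = idxs[k]
--             out[last] = i
--         else:
--             if pos == n2 - 1:
--                 if out[-1] == '\n':
--                     out[-1] = i.rstrip('\n') + '<mismatch>\n'
--                 else:
--                     out.append(i.rstrip('\n') + '<mismatch>\n')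
--             else:
--                 if last + 1 < len(out):
--                     out[last + 1] = i.rstrip('\n') + '<mismatch>\n'
--                 else:
--                     out.append(i.rstrip('\n') + '<mismatch>\n')
--                 last += 1
--         pos += 1
--     return out
-- ===== Notes on version B (the rewrite author's own statement) =====
-- stated objective: faster
-- what changed: A rescans list1 on every list2 element (the `in` membership test and the bounded list.index scan); B precomputes a value->sorted-index-list dict and a membership set once and finds the next usable occurrence by binary search.
import Mathlib
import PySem

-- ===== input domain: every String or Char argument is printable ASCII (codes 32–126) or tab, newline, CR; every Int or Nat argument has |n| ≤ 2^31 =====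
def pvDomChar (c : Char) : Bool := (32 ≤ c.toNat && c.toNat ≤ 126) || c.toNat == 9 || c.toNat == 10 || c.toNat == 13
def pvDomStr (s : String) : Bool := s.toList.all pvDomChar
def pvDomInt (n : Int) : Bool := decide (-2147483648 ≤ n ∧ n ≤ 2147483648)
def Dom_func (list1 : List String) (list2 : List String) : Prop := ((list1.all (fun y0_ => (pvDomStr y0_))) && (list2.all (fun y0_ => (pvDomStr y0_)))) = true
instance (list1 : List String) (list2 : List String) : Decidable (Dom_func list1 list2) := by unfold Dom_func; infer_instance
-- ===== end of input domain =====

-- B replaces A's repeated O(n) `in`/`list.index` scans by a set for membership plus a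
-- precomputed value→sorted-indices dict queried with binary search (faster, asymptotic).


-- ===== PORT A =====

-- Python's  i.rstrip('\n')  (exact: removes exactly the trailing '\n' characters)
def rstripNL (s : String) : String :=
  String.ofList ((s.toList.reverse.dropWhile (fun c => c == '\n')).reverse)

-- Python's  xs.index(v, start, len(xs)-1)  as an Option (none = ValueError);
-- exact for 0 ≤ start (the only reachable case: start = lastInsertedIndex+1 ≥ 0):
-- it searches indices start … len(xs)-2, i.e. xs.dropLast from position start.
def indexBefore (xs : List String) (v : String) (start : Nat) : Option Int :=
  match PySem.List.index? (xs.dropLast.drop start) v with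
  | some m => some ((start + m : Nat) : Int)
  | none => none

-- one iteration of A's for-loop; state = (list3, lastInsertedIndex, indexList2)
def stepA (list1 : List String) (n2 : Int) (st : List String × Int × Int) (i : String) :
    List String × Int × Int :=
  let list3 := st.1
  let last := st.2.1
  let pos := st.2.2
  if list1.contains i then
    match indexBefore list1 i (last + 1).toNat with
    | some index => (list3.set index.toNat i, index, pos + 1)
    | none => (list3, last, pos)          -- ValueError: continue (skips indexList2 += 1)
  else
    if pos == n2 - 1 then
      -- list3[len(list3)-1]: read via pyGet?; the write resolves index len-1
      -- (list3 = [] would be Python's IndexError, excluded by Pre_; default is unreachable)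
      if (PySem.List.pyGet? list3 ((list3.length : Int) - 1)).getD "\n" == "\n" then
        (list3.set (list3.length - 1) (rstripNL i ++ "<mismatch>\n"), last, pos + 1)
      else
        (list3 ++ [rstripNL i ++ "<mismatch>\n"], last, pos + 1)
    else
      -- try list3[last+1] = …  except IndexError: append  (last+1 ≥ 0 on every reachable state)
      if last + 1 < (list3.length : Int) then
        (list3.set (last + 1).toNat (rstripNL i ++ "<mismatch>\n"), last + 1, pos + 1)
      else
        (list3 ++ [rstripNL i ++ "<mismatch>\n"], last + 1, pos + 1)

def func (list1 : List String) (list2 : List String) : List String :=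
  (list2.foldl (stepA list1 (list2.length : Int))
    (List.replicate list1.length "\n", -1, 0)).1

-- ===== PORT B =====

-- Source B's hand-written _bisect_left: while lo < hi loop, mid = (lo+hi)//2
def bl (a : List Int) (x : Int) (lo hi : Nat) : Nat :=
  if lo < hi then
    if a.getD ((lo + hi) / 2) 0 < x then bl a x ((lo + hi) / 2 + 1) hi
    else bl a x lo ((lo + hi) / 2)
  else lo
termination_by hi - lo
decreasing_by all_goals omega

-- occ = {}; for idx, v in enumerate(list1[:-1]): occ.setdefault(v, []).append(idx)
def buildOcc (list1 : List String) : PySem.Dict String (List Int) :=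
  (PySem.List.enumerate (PySem.List.slice list1 none (some (-1)))).foldl
    (fun d p => d.modify p.2 [] (fun l => l ++ [p.1])) PySem.Dict.empty

-- one iteration of B's for-loop; state = (out, last, pos)
def stepB (occ : PySem.Dict String (List Int))
    (members : PySem.Set String) (n2 : Int) (st : List String × Int × Int) (i : String) :
    List String × Int × Int :=
  let out := st.1
  let last := st.2.1
  let pos := st.2.2
  if members.contains i then
    let idxs := occ.getD i []
    let k := bl idxs (last + 1) 0 idxs.length
    if k = idxs.length then st            -- continue: no occurrence left in the window
    else (out.set (idxs.getD k 0).toNat i, idxs.getD k 0, pos + 1)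
  else
    if pos == n2 - 1 then
      -- out[-1] read via pyGet? (-1); the write resolves index -1 to len-1
      -- (out = [] would be Python's IndexError, excluded by Pre_; default is unreachable)
      if (PySem.List.pyGet? out (-1)).getD "\n" == "\n" then
        (out.set (out.length - 1) (rstripNL i ++ "<mismatch>\n"), last, pos + 1)
      else
        (out ++ [rstripNL i ++ "<mismatch>\n"], last, pos + 1)
    else
      if last + 1 < (out.length : Int) then
        (out.set (last + 1).toNat (rstripNL i ++ "<mismatch>\n"), last + 1, pos + 1)
      else
        (out ++ [rstripNL i ++ "<mismatch>\n"], last + 1, pos + 1)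

def func_alt (list1 : List String) (list2 : List String) : List String :=
  let occ := buildOcc list1
  let members := PySem.Set.ofList list1
  (list2.foldl (stepB occ members (list2.length : Int))
    (List.replicate list1.length "\n", -1, 0)).1

-- ===== PRECONDITION & SPEC =====
-- Pre_ excludes exactly the inputs where A raises an uncaught IndexError (reading
-- list3[-1] of the empty result list): list1 empty and list2 a single element.
def Pre_func (list1 : List String) (list2 : List String) : Prop :=
  ¬(list1 = [] ∧ list2.length = 1)
instance (list1 : List String) (list2 : List String) : Decidable (Pre_func list1 list2) := by
  unfold Pre_func; infer_instance

def pvWitness_func : List String × List String := (["a"], ["a"])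

def Spec_func (list1 : List String) (list2 : List String) (out : List String) : Prop := out = func_alt list1 list2
instance (list1 : List String) (list2 : List String) (out : List String) : Decidable (Spec_func list1 list2 out) := by unfold Spec_func; infer_instance

-- ===== CLAIM (what is proved, stated in full; the proofs are below) =====
def Claim_equal_func : Prop := ∀ (list1 : List String) (list2 : List String), Dom_func list1 list2 → Pre_func list1 list2 → Spec_func list1 list2 (func list1 list2)

-- ===== LEMMAS AND PROOFS =====

-- the ordered list of indices the dict stores for value i: positions < len(list1)-1 holding i
def occList (list1 : List String) (i : String) : List Int :=
  ((PySem.List.enumerate list1.dropLast).filter (fun p => p.2 == i)).map (·.1)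

theorem buildOcc_getD (list1 : List String) (i : String) :
    (buildOcc list1).getD i [] = occList list1 i := by
  unfold buildOcc occList
  rw [PySem.List.slice_to_neg_one]
  have h1 : ((PySem.List.enumerate list1.dropLast).map Prod.swap).foldl
      (fun (d : PySem.Dict String (List Int)) p => d.modify p.1 [] (fun l => l ++ [p.2]))
      PySem.Dict.empty
      = (PySem.List.enumerate list1.dropLast).foldl
      (fun d p => d.modify p.2 [] (fun l => l ++ [p.1])) PySem.Dict.empty := by
    rw [List.foldl_map]; rfl
  rw [← h1, PySem.Dict.getD_foldl_modify_append, PySem.Dict.getD_empty]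
  simp [List.filter_map, List.map_map, Function.comp_def, Prod.swap]

theorem mem_enumerate_ge {α : Type} (l : List α) (s : Int) :
    ∀ p ∈ PySem.List.enumerate l s, s ≤ p.1 := by
  induction l generalizing s with
  | nil => simp [PySem.List.enumerate]
  | cons x xs ih =>
    intro p hp
    rw [PySem.List.enumerate_cons] at hp
    rcases List.mem_cons.mp hp with h | h
    · simp [h]
    · have := ih (s + 1) p h; omega

theorem enumerate_pairwise {α : Type} (l : List α) (s : Int) :
    List.Pairwise (fun p q => p.1 < q.1) (PySem.List.enumerate l s) := by
  induction l generalizing s with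
  | nil => simp [PySem.List.enumerate]
  | cons x xs ih =>
    rw [PySem.List.enumerate_cons]
    refine List.Pairwise.cons ?_ (ih (s + 1))
    intro q hq
    have := mem_enumerate_ge xs (s + 1) q hq
    simp only
    omega

theorem occList_sorted (list1 : List String) (i : String) :
    List.Pairwise (· < ·) (occList list1 i) := by
  unfold occList
  exact ((enumerate_pairwise list1.dropLast 0).filter _).map _ (fun _ _ h => h)

-- find? only looks at members
theorem find?_congr_mem {α : Type} {p q : α → Bool} (l : List α)
    (h : ∀ a ∈ l, p a = q a) : l.find? p = l.find? q := by
  induction l with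
  | nil => rfl
  | cons x xs ih =>
    simp only [List.find?_cons]
    rw [h x (List.mem_cons_self)]
    cases q x
    · exact ih fun a ha => h a (List.mem_cons_of_mem _ ha)
    · rfl

-- find? with the threshold predicate over the enumerated occurrence list is Python's
-- bounded index search on the dropped list
theorem find?_enum_eq_index? (i : String) :
    ∀ (D : List String) (s0 : Int) (start : Nat),
    (((PySem.List.enumerate D s0).filter (fun p => p.2 == i)).map (·.1)).find?
        (fun e => decide (s0 + start ≤ e))
      = Option.map (fun m : Nat => s0 + (start : Int) + (m : Int))
          (PySem.List.index? (D.drop start) i) := by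
  intro D
  induction D with
  | nil => intro s0 start; simp [PySem.List.enumerate, PySem.List.index?]
  | cons x D' ih =>
    intro s0 start
    rw [PySem.List.enumerate_cons]
    match start with
    | 0 =>
      by_cases hx : x = i
      · subst hx
        rw [List.drop_zero, PySem.List.index?_cons_self]
        simp only [List.filter_cons, BEq.rfl, if_true, List.map_cons]
        rw [List.find?_cons_of_pos (by simp)]
        simp
      · rw [List.drop_zero, PySem.List.index?_cons_of_ne D' hx]
        have hfx : (x == i) = false := by simp [hx]
        simp only [List.filter_cons, hfx, Bool.false_eq_true, if_false]
        have hcong := find?_congr_mem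
          (p := fun e => decide (s0 + ((0 : Nat) : Int) ≤ e))
          (q := fun e => decide (s0 + 1 + ((0 : Nat) : Int) ≤ e))
          (((PySem.List.enumerate D' (s0 + 1)).filter (fun p => p.2 == i)).map (·.1))
          (by
            intro e he
            simp only [List.mem_map, List.mem_filter] at he
            obtain ⟨p, ⟨hp, _⟩, rfl⟩ := he
            have := mem_enumerate_ge D' (s0 + 1) p hp
            simp only [decide_eq_decide]
            omega)
        rw [hcong, ih (s0 + 1) 0, Option.map_map]
        congr 1
        funext m
        simp only [Function.comp_apply]
        push_cast
        ring
    | start' + 1 =>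
      rw [List.drop_succ_cons]
      have hcong := find?_congr_mem
        (p := fun e => decide (s0 + ((start' + 1 : Nat) : Int) ≤ e))
        (q := fun e => decide (s0 + 1 + ((start' : Nat) : Int) ≤ e))
        (((PySem.List.enumerate D' (s0 + 1)).filter (fun p => p.2 == i)).map (·.1))
        (by
          intro e _
          simp only [decide_eq_decide]
          push_cast
          omega)
      by_cases hx : (x == i) = true
      · simp only [List.filter_cons, hx, if_true, List.map_cons]
        rw [List.find?_cons_of_neg (by simp only [decide_eq_true_eq, not_le]; push_cast; omega)]
        rw [hcong, ih (s0 + 1) start']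
        congr 1
        funext m
        push_cast
        ring
      · simp only [List.filter_cons, hx, Bool.false_eq_true, if_false]
        rw [hcong, ih (s0 + 1) start']
        congr 1
        funext m
        push_cast
        ring

-- generic: if the first k elements refute p and element k (if any) satisfies it,
-- find? returns element k
theorem find?_eq_getElem? {p : Int → Bool} :
    ∀ (l : List Int) (k : Nat), k ≤ l.length →
    (∀ j (hj : j < l.length), j < k → p l[j] = false) →
    (∀ (hk : k < l.length), p l[k] = true) →
    l.find? p = l[k]? := by
  intro l
  induction l with
  | nil =>
    intro k hk _ _
    simp at hk
    subst hk
    rfl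
  | cons x xs ih =>
    intro k hk h1 h2
    match k with
    | 0 =>
      have h0 : p x = true := by simpa using h2 (by simp)
      rw [List.find?_cons_of_pos h0]
      simp
    | k' + 1 =>
      have hx : p x = false := by simpa using h1 0 (by simp) (by omega)
      rw [List.find?_cons_of_neg (by simp [hx])]
      rw [ih k' (by simpa using hk)
        (fun j hj hjk => h1 (j + 1) (by simpa using hj) (by omega))
        (fun hk' => h2 (by simpa using hk'))]
      simp

-- the hand-written binary search satisfies the bisect_left specification
theorem bl_inv (a : List Int) (x : Int) (hs : List.Pairwise (· ≤ ·) a) :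
    ∀ (n lo hi : Nat), hi - lo = n → lo ≤ hi → hi ≤ a.length →
    (∀ j (hj : j < a.length), j < lo → a[j] < x) →
    (∀ j (hj : j < a.length), hi ≤ j → x ≤ a[j]) →
    lo ≤ bl a x lo hi ∧ bl a x lo hi ≤ hi ∧
    (∀ j (hj : j < a.length), j < bl a x lo hi → a[j] < x) ∧
    (∀ j (hj : j < a.length), bl a x lo hi ≤ j → x ≤ a[j]) := by
  have hmono : ∀ i j (hi : i < a.length) (hj : j < a.length), i ≤ j → a[i] ≤ a[j] := by
    intro i j hi hj hij
    rcases Nat.lt_or_ge i j with h | h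
    · exact (List.pairwise_iff_getElem.mp hs) i j hi hj h
    · have : i = j := by omega
      subst this
      rfl
  intro n
  induction n using Nat.strong_induction_on with
  | _ n ihn =>
    intro lo hi hn hle hlen hlo hhi
    rw [bl]
    by_cases hlt : lo < hi
    · rw [if_pos hlt]
      have hmidlt : (lo + hi) / 2 < a.length := by omega
      rw [List.getD_eq_getElem a 0 hmidlt]
      by_cases hc : a[(lo + hi) / 2] < x
      · rw [if_pos hc]
        have hrec := ihn (hi - ((lo + hi) / 2 + 1)) (by omega) ((lo + hi) / 2 + 1) hi rfl
          (by omega) hlen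
          (fun j hj hjm =>
            lt_of_le_of_lt (hmono j ((lo + hi) / 2) hj hmidlt (by omega)) hc)
          hhi
        exact ⟨by omega, hrec.2.1, hrec.2.2.1, hrec.2.2.2⟩
      · rw [if_neg hc]
        rw [not_lt] at hc
        have hrec := ihn ((lo + hi) / 2 - lo) (by omega) lo ((lo + hi) / 2) rfl
          (by omega) (by omega) hlo
          (fun j hj hjm => le_trans hc (hmono ((lo + hi) / 2) j hmidlt hj hjm))
        exact ⟨hrec.1, by omega, hrec.2.2.1, hrec.2.2.2⟩
    · rw [if_neg hlt]
      exact ⟨le_refl _, by omega, hlo, fun j hj hij => hhi j hj (by omega)⟩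

-- the bisect-indexed element of the occurrence list IS Python's bounded index search
theorem bisect_eq_indexBefore (list1 : List String) (i : String) (last : Int)
    (hlast : -1 ≤ last) :
    (occList list1 i)[bl (occList list1 i) (last + 1) 0 (occList list1 i).length]? =
      indexBefore list1 i (last + 1).toNat := by
  have hs : List.Pairwise (· ≤ ·) (occList list1 i) :=
    (occList_sorted list1 i).imp (fun h => le_of_lt h)
  have hspec := bl_inv (occList list1 i) (last + 1) hs
    ((occList list1 i).length - 0) 0 (occList list1 i).length rfl
    (by omega) (le_refl _) (by omega) (by intro j hj hj'; omega)
  have hfind : (occList list1 i).find? (fun e => decide (last + 1 ≤ e)) =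
      (occList list1 i)[bl (occList list1 i) (last + 1) 0 (occList list1 i).length]? := by
    apply find?_eq_getElem? _ _ hspec.2.1
    · intro j hj hjk
      simp only [decide_eq_false_iff_not, not_le]
      exact hspec.2.2.1 j hj hjk
    · intro hk'
      simp only [decide_eq_true_eq]
      exact hspec.2.2.2 _ hk' (le_refl _)
  rw [← hfind]
  unfold indexBefore occList
  have hmain := find?_enum_eq_index? i list1.dropLast 0 ((last + 1).toNat)
  have hpred : (fun e => decide (last + 1 ≤ e))
      = (fun e => decide ((0 : Int) + (((last + 1).toNat : Nat) : Int) ≤ e)) := by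
    funext e
    simp only [decide_eq_decide]
    omega
  rw [hpred, hmain]
  cases h : PySem.List.index? (list1.dropLast.drop (last + 1).toNat) i with
  | none => rfl
  | some m =>
    simp only [Option.map_some]
    congr 1
    push_cast
    omega

-- membership in the set built from list1 is membership in list1
theorem set_contains_eq (list1 : List String) (i : String) :
    (PySem.Set.ofList list1).contains i = list1.contains i := by
  rw [PySem.Set.contains_eq_listContains]
  simp only [List.contains_eq_mem, decide_eq_decide]
  exact PySem.Set.mem_ofList list1 i

-- reading index len-1 is reading index -1
theorem pyGet?_last_eq (l : List String) :
    PySem.List.pyGet? l ((l.length : Int) - 1) = PySem.List.pyGet? l (-1) := by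
  cases l with
  | nil => rfl
  | cons x xs => simp [PySem.List.pyGet?, PySem.List.pyIdx?]

-- the two loop bodies agree on every state with lastInsertedIndex ≥ -1
theorem step_eq (list1 : List String) (n2 : Int) (i : String)
    (st : List String × Int × Int) (hlast : -1 ≤ st.2.1) :
    stepA list1 n2 st i
      = stepB (buildOcc list1) (PySem.Set.ofList list1) n2 st i := by
  obtain ⟨out, last, pos⟩ := st
  simp only at hlast
  unfold stepA stepB
  simp only [set_contains_eq, buildOcc_getD]
  by_cases hmem : list1.contains i = true
  · simp only [hmem, if_true]
    have hb := bisect_eq_indexBefore list1 i last hlast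
    by_cases hkl : bl (occList list1 i) (last + 1) 0 (occList list1 i).length
        = (occList list1 i).length
    · have hnone : (occList list1 i)[bl (occList list1 i) (last + 1) 0
          (occList list1 i).length]? = none := by
        rw [List.getElem?_eq_none_iff]
        omega
      rw [hnone] at hb
      rw [← hb]
      simp [hkl]
    · have hklt : bl (occList list1 i) (last + 1) 0 (occList list1 i).length
          < (occList list1 i).length := by
        have := (bl_inv (occList list1 i) (last + 1)
          ((occList_sorted list1 i).imp (fun h => le_of_lt h))
          ((occList list1 i).length - 0) 0 (occList list1 i).length rfl
          (by omega) (le_refl _) (by omega) (by intro j hj hj'; omega)).2.1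
        omega
      rw [List.getElem?_eq_getElem hklt] at hb
      rw [← hb]
      simp only [hkl, if_false]
      rw [List.getD_eq_getElem (occList list1 i) 0 hklt]
  · simp only [Bool.not_eq_true] at hmem
    simp only [hmem, Bool.false_eq_true, if_false]
    rw [pyGet?_last_eq]

-- the invariant -1 ≤ last is preserved by A's loop body
theorem stepA_last_ge (list1 : List String) (n2 : Int) (i : String)
    (st : List String × Int × Int) (hlast : -1 ≤ st.2.1) :
    -1 ≤ (stepA list1 n2 st i).2.1 := by
  obtain ⟨out, last, pos⟩ := st
  simp only at hlast
  unfold stepA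
  by_cases hmem : list1.contains i = true
  · simp only [hmem, if_true]
    cases hidx : indexBefore list1 i (last + 1).toNat with
    | none => simpa using hlast
    | some index =>
      have : 0 ≤ index := by
        unfold indexBefore at hidx
        cases h : PySem.List.index? (list1.dropLast.drop (last + 1).toNat) i with
        | none => rw [h] at hidx; simp at hidx
        | some m => rw [h] at hidx; simp at hidx; omega
      exact le_trans (by norm_num) this
  · simp only [Bool.not_eq_true] at hmem
    simp only [hmem, Bool.false_eq_true, if_false]
    split_ifs <;> simp <;> omega

theorem foldl_eq (list1 : List String) (n2 : Int) :
    ∀ (l2 : List String) (st : List String × Int × Int), -1 ≤ st.2.1 →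
    l2.foldl (stepA list1 n2) st
      = l2.foldl (stepB (buildOcc list1) (PySem.Set.ofList list1) n2) st := by
  intro l2
  induction l2 with
  | nil => intro st _; rfl
  | cons i l2' ih =>
    intro st hst
    simp only [List.foldl_cons]
    rw [← step_eq list1 n2 i st hst]
    exact ih _ (stepA_last_ge list1 n2 i st hst)

-- ===== VERDICT (by name: the statement is the Claim_ definition above) =====
theorem func_spec : Claim_equal_func := by
  intro list1 list2 _ _
  unfold Spec_func func func_alt
  rw [foldl_eq list1 (list2.length : Int) list2 _ (by norm_num)]
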